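-- pv_equiv track=rewrite | github.com/wakame-tech/kyopro | src/abc065/abc065_b/main.py | solve
-- ===== SOURCE A (Python) =====
-- def solve(a):
--     c = 0
--     cnt = 0
--     while True:
--         c = a[c]
--         cnt += 1
--         if c == 1:
--             return cnt
--         if cnt > len(a):
--             break
--     return -1
-- ===== SOURCE B (Python) =====
-- def solve(a):
--     seen = set()
--     c = 0
--     while c not in seen and c != 1:
--         seen.add(c)
--         c = a[c]
--     return len(seen) if c == 1 else -1
-- ===== Notes on version B (the rewrite author's own statement) =====
-- stated objective: alternative
-- what changed: B drops A's step counter and length cap (cnt > len(a)): it walks the chain keeping a visited set, stops at the first revisited node or at 1, and computes the answer from the final state (len(seen) on success, -1 on a repeat).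
import Mathlib
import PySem

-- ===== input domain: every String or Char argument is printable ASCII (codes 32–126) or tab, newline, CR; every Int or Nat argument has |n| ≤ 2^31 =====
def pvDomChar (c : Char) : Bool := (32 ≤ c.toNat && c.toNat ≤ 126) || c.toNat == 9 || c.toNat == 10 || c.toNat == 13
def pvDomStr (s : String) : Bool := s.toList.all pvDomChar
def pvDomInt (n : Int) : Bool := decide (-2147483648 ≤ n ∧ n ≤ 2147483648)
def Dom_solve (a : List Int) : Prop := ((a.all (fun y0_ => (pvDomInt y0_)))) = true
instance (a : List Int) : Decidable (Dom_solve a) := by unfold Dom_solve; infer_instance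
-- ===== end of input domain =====

-- B replaces A's counter-with-length-cap loop by a walk that stops at the first revisited
-- node (visited set) or at 1, and computes the answer from the final state (alternative).

-- ===== PORT A =====
-- A's 'while True' loop; the fuel argument only guarantees termination: A's own
-- 'cnt > len(a)' break fires no later than the fuel runs out, so the fuel-0 branch is
-- unreachable on inputs admitted by Pre_; where Python raises IndexError (pyGet? = none,
-- outside Pre_) the port returns -1.
def solveGoA (a : List Int) (fuel : Nat) (c cnt : Int) : Int :=
  match fuel with
  | 0 => -1
  | Nat.succ f =>
    match PySem.List.pyGet? a c with
    | none => -1                                   -- IndexError (excluded by Pre_)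
    | some c' =>
      if c' = 1 then cnt + 1
      else if cnt + 1 > (a.length : Int) then -1
      else solveGoA a f c' (cnt + 1)

def solve (a : List Int) : Int := solveGoA a (a.length + 1) 0 0

-- ===== PORT B =====
-- B's 'while c not in seen and c != 1' loop, returned as the final (seen, c) state;
-- under Pre_ a repeat or 1 occurs before the fuel runs out, so the fuel-0 branch is
-- unreachable there; a failed dereference (IndexError, outside Pre_) also stops the loop.
def solveLoopB (a : List Int) (fuel : Nat) (seen : PySem.Set Int) (c : Int) :
    PySem.Set Int × Int :=
  if PySem.Set.contains seen c || c == 1 then (seen, c)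
  else
    match fuel with
    | 0 => (seen, c)
    | Nat.succ f =>
      match PySem.List.pyGet? a c with
      | none => (seen, c)                          -- IndexError (excluded by Pre_)
      | some c' => solveLoopB a f (PySem.Set.add seen c) c'

def solve_alt (a : List Int) : Int :=
  let st := solveLoopB a (a.length + 2) PySem.Set.empty 0
  if st.2 = 1 then (PySem.Set.len st.1 : Int) else -1

-- ===== PRECONDITION & SPEC =====
-- the pointer walk A performs: chain a k = the value of c after k dereferences (none = IndexError)
def chain (a : List Int) : Nat → Option Int
  | 0 => some 0
  | Nat.succ k => (chain a k).bind (PySem.List.pyGet? a)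

-- A raises IndexError exactly when some dereference it actually performs is out of range:
-- iteration k+1 is performed iff no earlier value was 1; Pre_ demands exactly those
-- dereferences succeed.  Pre_ excludes no input on which A returns.
def Pre_solve (a : List Int) : Prop :=
  ∀ k ∈ List.range (a.length + 1),
    (∀ j ∈ List.range k, chain a (j + 1) ≠ some 1) → (chain a (k + 1)).isSome = true
instance (a : List Int) : Decidable (Pre_solve a) := by unfold Pre_solve; infer_instance

def pvWitness_solve : List Int := [1]

def Spec_solve (a : List Int) (out : Int) : Prop := out = solve_alt a
instance (a : List Int) (out : Int) : Decidable (Spec_solve a out) := by unfold Spec_solve; infer_instance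

-- ===== CLAIM (what is proved, stated in full; the proofs are below) =====
def Claim_equal_solve : Prop := ∀ (a : List Int), Dom_solve a → Pre_solve a → Spec_solve a (solve a)

-- ===== LEMMAS AND PROOFS =====

-- the value of the walk at step i (junk 0 where undefined; only read where defined)
def cVal (a : List Int) (i : Nat) : Int := (chain a i).getD 0

-- Python's index normalisation for an in-range index
def cellIdx (len : Nat) (i : Int) : Nat := (if i < 0 then i + len else i).toNat

theorem chain_succ_eq (a : List Int) (k : Nat) :
    chain a (k + 1) = (chain a k).bind (PySem.List.pyGet? a) := rfl

theorem chain_defined_down (a : List Int) (m k : Nat) (hk : k ≤ m)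
    (h : (chain a m).isSome = true) : (chain a k).isSome = true := by
  induction m with
  | zero => have : k = 0 := by omega
            subst this; exact h
  | succ n ih =>
    rcases Nat.eq_or_lt_of_le hk with rfl | hlt
    · exact h
    · have hn : (chain a n).isSome = true := by
        rw [chain_succ_eq] at h
        cases hE : chain a n with
        | none => rw [hE] at h; simp at h
        | some v => simp
      exact ih (by omega) hn

theorem chain_periodic (a : List Int) (i j : Nat) (h : chain a i = chain a j) :
    ∀ d, chain a (i + d) = chain a (j + d) := by
  intro d
  induction d with
  | zero => simpa using h
  | succ e ih =>
    have h1 : i + (e + 1) = (i + e) + 1 := by omega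
    have h2 : j + (e + 1) = (j + e) + 1 := by omega
    rw [h1, h2, chain_succ_eq, chain_succ_eq, ih]

theorem chain_neverOne (a : List Int) (m j : Nat) (hj : j < m)
    (heq : chain a m = chain a j)
    (hnh : ∀ f, 1 ≤ f → f ≤ m → chain a f ≠ some 1) :
    ∀ k, chain a k ≠ some 1 := by
  intro k
  induction k using Nat.strong_induction_on with
  | _ k ih =>
    rcases (show k ≤ m ∨ m < k by omega) with hkm | hkm
    · rcases Nat.eq_zero_or_pos k with rfl | hk1
      · simp [chain]
      · exact hnh k hk1 hkm
    · have hd : m + (k - m) = k := by omega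
      have hper := chain_periodic a m j heq (k - m)
      rw [hd] at hper
      rw [hper]
      exact ih (j + (k - m)) (by omega)

theorem solveGoA_nohit (a : List Int) (hno : ∀ k, chain a k ≠ some 1) :
    ∀ (fuel : Nat) (c cnt : Int) (m : Nat), chain a m = some c →
      solveGoA a fuel c cnt = -1 := by
  intro fuel
  induction fuel with
  | zero => intro c cnt m _; simp [solveGoA]
  | succ f ih =>
    intro c cnt m hc
    cases hg : PySem.List.pyGet? a c with
    | none => simp [solveGoA, hg]
    | some c' =>
      have hch : chain a (m + 1) = some c' := by
        rw [chain_succ_eq, hc]; simpa using hg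
      have hc1 : c' ≠ 1 := by
        intro h; exact hno (m + 1) (by rw [hch, h])
      by_cases hgt : cnt + 1 > (a.length : Int)
      · simp [solveGoA, hg, hc1, hgt]
      · simp only [solveGoA, hg, if_neg hc1, if_neg hgt]
        exact ih c' (cnt + 1) (m + 1) hch

theorem pyGet?_cellIdx (a : List Int) (i : Int)
    (h : PySem.Raise.InRange a.length i) :
    PySem.List.pyGet? a i = a[cellIdx a.length i]? := by
  unfold PySem.Raise.InRange at h
  by_cases hi : i < 0
  · have hk1 : 0 < (-i).toNat := by omega
    have hk2 : (-i).toNat ≤ a.length := by omega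
    have hieq : i = -(((-i).toNat : Nat) : Int) := by omega
    rw [hieq, PySem.List.pyGet?_neg_natCast a (-i).toNat hk1 hk2]
    have : cellIdx a.length (-(((-i).toNat : Nat) : Int)) = a.length - (-i).toNat := by
      unfold cellIdx; omega
    rw [this]
  · have h0 : 0 ≤ i := by omega
    rw [PySem.List.pyGet?_of_nonneg a h0]
    have : cellIdx a.length i = i.toNat := by unfold cellIdx; omega
    rw [this]

theorem cellIdx_lt (len : Nat) (i : Int) (h : PySem.Raise.InRange len i) :
    cellIdx len i < len := by
  unfold PySem.Raise.InRange at h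
  unfold cellIdx
  omega

theorem chain_inRange (a : List Int) (i : Nat)
    (h : (chain a (i + 1)).isSome = true) :
    PySem.Raise.InRange a.length (cVal a i) := by
  have h0 : (chain a i).isSome = true := chain_defined_down a (i + 1) i (by omega) h
  obtain ⟨ci, hci⟩ := Option.isSome_iff_exists.mp h0
  have hchain : chain a (i + 1) = PySem.List.pyGet? a ci := by
    rw [chain_succ_eq, hci]; rfl
  rw [hchain] at h
  have hIR : PySem.Raise.InRange a.length ci := by
    by_contra hn
    rw [(PySem.List.pyGet?_eq_none_iff a ci).mpr hn] at h
    simp at h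
  simpa [cVal, hci] using hIR

-- pigeonhole on cells: a walk defined for a.length + 1 steps repeats a value
theorem chain_dup (a : List Int) (c : Int)
    (h : chain a (a.length + 1) = some c) :
    ∃ i j, i < j ∧ j ≤ a.length + 1 ∧ chain a i = chain a j := by
  have hdef : ∀ i, i ≤ a.length + 1 → (chain a i).isSome = true := by
    intro i hi; exact chain_defined_down a (a.length + 1) i hi (by simp [h])
  have hrange : ∀ i, i ≤ a.length → PySem.Raise.InRange a.length (cVal a i) := by
    intro i hi; exact chain_inRange a i (hdef (i + 1) (by omega))
  have hmap : ∀ x ∈ Finset.range (a.length + 1),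
      cellIdx a.length (cVal a x) ∈ Finset.range a.length := by
    intro x hx
    rw [Finset.mem_range] at hx ⊢
    exact cellIdx_lt a.length (cVal a x) (hrange x (by omega))
  have hcard : (Finset.range a.length).card < (Finset.range (a.length + 1)).card := by
    simp
  obtain ⟨x, hx, y, hy, hne, heq⟩ :=
    Finset.exists_ne_map_eq_of_card_lt_of_maps_to hcard hmap
  rw [Finset.mem_range] at hx hy
  have hstep : ∀ u v : Nat, u ≤ a.length → v ≤ a.length →
      cellIdx a.length (cVal a u) = cellIdx a.length (cVal a v) →
      chain a (u + 1) = chain a (v + 1) := by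
    intro u v hu hv he
    have hcu : chain a u = some (cVal a u) := by
      obtain ⟨w, hw⟩ := Option.isSome_iff_exists.mp (hdef u (by omega))
      simp [cVal, hw]
    have hcv : chain a v = some (cVal a v) := by
      obtain ⟨w, hw⟩ := Option.isSome_iff_exists.mp (hdef v (by omega))
      simp [cVal, hw]
    rw [chain_succ_eq, chain_succ_eq, hcu, hcv]
    simp only [Option.bind_some]
    rw [pyGet?_cellIdx a _ (hrange u hu), pyGet?_cellIdx a _ (hrange v hv), he]
  rcases Nat.lt_or_gt_of_ne hne with hlt | hlt
  · exact ⟨x + 1, y + 1, by omega, by omega,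
      hstep x y (by omega) (by omega) heq⟩
  · exact ⟨y + 1, x + 1, by omega, by omega,
      hstep y x (by omega) (by omega) heq.symm⟩

theorem solveGoA_succ_some (a : List Int) (f : Nat) (c cnt c' : Int)
    (hg : PySem.List.pyGet? a c = some c') :
    solveGoA a (f + 1) c cnt =
      if c' = 1 then cnt + 1
      else if cnt + 1 > (a.length : Int) then -1
      else solveGoA a f c' (cnt + 1) := by
  simp [solveGoA, hg]

theorem solveLoopB_stop (a : List Int) (fuel : Nat) (seen : PySem.Set Int) (c : Int)
    (h : c ∈ seen ∨ c = 1) :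
    solveLoopB a fuel seen c = (seen, c) := by
  have : (PySem.Set.contains seen c || c == 1) = true := by
    rcases h with h | h
    · simp [PySem.Set.contains, h]
    · simp [h]
  unfold solveLoopB
  rw [this]
  simp

theorem solveLoopB_step (a : List Int) (f : Nat) (seen : PySem.Set Int) (c c' : Int)
    (hmem : c ∉ seen) (hc1 : c ≠ 1) (hg : PySem.List.pyGet? a c = some c') :
    solveLoopB a (f + 1) seen c = solveLoopB a f (PySem.Set.add seen c) c' := by
  have : (PySem.Set.contains seen c || c == 1) = false := by
    simp [PySem.Set.contains, hmem, hc1]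
  conv_lhs => rw [solveLoopB]
  rw [this]
  simp only [Bool.false_eq_true, if_false, hg]

theorem main_lemma (a : List Int) (hpre : Pre_solve a) :
    ∀ (fl m : Nat) (c : Int) (seen : PySem.Set Int),
      fl + m = a.length + 1 →
      chain a m = some c →
      (∀ f, 1 ≤ f → f ≤ m → chain a f ≠ some 1) →
      seen = (List.range m).map (cVal a) →
      seen.Nodup →
      solveGoA a fl c (m : Int) =
        (let st := solveLoopB a (fl + 1) seen c
         if st.2 = 1 then (PySem.Set.len st.1 : Int) else -1) := by
  intro fl
  induction fl with
  | zero =>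
    intro m c seen hfm hc hnh hseen hnd
    have hm : m = a.length + 1 := by omega
    subst hm
    -- A's side is -1 (fuel 0 = the state just after A's cnt > len break);
    -- B's loop stops at once: c has already been seen, by the pigeonhole on cells
    obtain ⟨i, j, hij, hjm, heq⟩ := chain_dup a c hc
    have hcmem : c ∈ seen := by
      subst hseen
      rcases Nat.lt_or_ge j (a.length + 1) with hjlt | hjge
      · exfalso
        have hinj := (List.nodup_map_iff_inj_on List.nodup_range).mp hnd
        have hvi : cVal a i = cVal a j := by simp [cVal, heq]
        have := hinj _ (List.mem_range.mpr (by omega)) _ (List.mem_range.mpr (by omega)) hvi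
        omega
      · have hj : j = a.length + 1 := by omega
        subst hj
        have hvi : cVal a i = c := by
          simp [cVal, heq.trans hc]
        exact hvi ▸ List.mem_map.mpr ⟨i, List.mem_range.mpr (by omega), rfl⟩
    have hc1 : c ≠ 1 := by
      intro h; exact hnh (a.length + 1) (by omega) (by omega) (h ▸ hc)
    rw [solveLoopB_stop a _ seen c (Or.inl hcmem)]
    simp [solveGoA, hc1]
  | succ f ih =>
    intro m c seen hfm hc hnh hseen hnd
    have hmlen : m ≤ a.length := by omega
    have hc1 : c ≠ 1 := by
      rcases Nat.eq_zero_or_pos m with rfl | hm1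
      · have : (0 : Int) = c := by simpa [chain] using hc
        omega
      · intro h; exact hnh m (by omega) (by omega) (h ▸ hc)
    by_cases hcmem : c ∈ seen
    · -- B exits its loop; A keeps walking a cycle that never reaches 1
      obtain ⟨j, hjr, hjv⟩ := List.mem_map.mp (hseen ▸ hcmem)
      have hjm : j < m := List.mem_range.mp hjr
      have hcj : chain a j = some c := by
        obtain ⟨v, hv⟩ := Option.isSome_iff_exists.mp
          (chain_defined_down a m j (by omega) (by simp [hc]))
        have hvc : v = c := by simpa [cVal, hv] using hjv
        rw [hv, hvc]
      have hno : ∀ k, chain a k ≠ some 1 :=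
        chain_neverOne a m j hjm (by rw [hc, hcj]) hnh
      have hA : solveGoA a (f + 1) c (m : Int) = -1 :=
        solveGoA_nohit a hno (f + 1) c (m : Int) m hc
      rw [hA, solveLoopB_stop a _ seen c (Or.inl hcmem)]
      simp [hc1]
    · -- B adds c; both sides dereference c, which Pre_ makes succeed
      have hsome : (chain a (m + 1)).isSome = true := by
        apply hpre m (List.mem_range.mpr (by omega))
        intro j hj
        exact hnh (j + 1) (by omega) (by have := List.mem_range.mp hj; omega)
      have hchm : chain a (m + 1) = (PySem.List.pyGet? a c) := by
        rw [chain_succ_eq, hc]; rfl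
      rw [hchm] at hsome
      obtain ⟨c', hg⟩ := Option.isSome_iff_exists.mp hsome
      have hch' : chain a (m + 1) = some c' := by rw [hchm, hg]
      have hadd : PySem.Set.add seen c = seen ++ [c] := by
        simp [PySem.Set.add, PySem.Set.contains, hcmem]
      have hlenseen : seen.length = m := by
        rw [hseen]; simp
      have hBstep : solveLoopB a (f + 1 + 1) seen c
          = solveLoopB a (f + 1) (seen ++ [c]) c' := by
        rw [solveLoopB_step a (f + 1) seen c c' hcmem hc1 hg, hadd]
      by_cases hone : c' = 1
      · subst hone
        rw [solveGoA_succ_some a f c _ _ hg]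
        rw [hBstep, solveLoopB_stop a _ _ 1 (Or.inr rfl)]
        simp [PySem.Set.len, hlenseen]
      · -- invariants one step later
        have hseen' : seen ++ [c] = (List.range (m + 1)).map (cVal a) := by
          rw [List.range_succ, List.map_append, ← hseen]
          simp [cVal, hc]
        have hnd' : (seen ++ [c]).Nodup := by
          refine List.nodup_append.mpr ⟨hnd, List.nodup_singleton c, ?_⟩
          intro x hx y hy
          rw [List.mem_singleton] at hy
          subst hy
          exact fun hxy => hcmem (hxy ▸ hx)
        have hnh' : ∀ g, 1 ≤ g → g ≤ m + 1 → chain a g ≠ some 1 := by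
          intro g hg1 hgm
          rcases Nat.lt_or_ge g (m + 1) with hlt | hge
          · exact hnh g hg1 (by omega)
          · have : g = m + 1 := by omega
            subst this
            rw [hch']; simpa using hone
        have hcast : ((m : Int) + 1) = ((m + 1 : Nat) : Int) := by push_cast; ring
        have hIH := ih (m + 1) c' (seen ++ [c]) (by omega) hch' hnh' hseen' hnd'
        rw [solveGoA_succ_some a f c _ _ hg]
        simp only [if_neg hone]
        rw [hBstep, hcast]
        by_cases hgt : (((m + 1 : Nat)) : Int) > (a.length : Int)
        · have hf0 : f = 0 := by omega
          subst hf0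
          rw [if_pos hgt]
          exact hIH
        · rw [if_neg hgt]
          exact hIH

-- ===== VERDICT (by name: the statement is the Claim_ definition above) =====
theorem solve_spec : Claim_equal_solve := by
  intro a _hd hpre
  unfold Spec_solve solve solve_alt
  have h := main_lemma a hpre (a.length + 1) 0 0 PySem.Set.empty (by omega) rfl
    (by intro f hf1 hf2; omega) (by simp [PySem.Set.empty]) (by simp [PySem.Set.empty])
  simpa using h
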